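-- pv_equiv track=rewrite | github.com/Mocha2007/mochalib | markov.py | make_markov
-- ===== SOURCE A (Python) =====
-- def make_markov(text: str) -> dict:
-- 	"""
-- 	king james bible - 1053 ms
-- 	"""
-- 	output = {}
-- 	words = text.split()
-- 	for i, word in enumerate(words):
-- 		if i == len(words) - 1:
-- 			break
-- 		next_word = words[i+1]
-- 		if word not in output:
-- 			output[word] = {}
-- 		if next_word in output[word]:
-- 			output[word][next_word] += 1
-- 		else:
-- 			output[word][next_word] = 1
-- 	return output
-- ===== SOURCE B (Python) =====
-- def _count(ns):
--     c = {}
--     for n in ns: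
--         c[n] = c.get(n, 0) + 1
--     return c
--
--
-- def make_markov(text: str) -> dict:
--     words = text.split()
--     groups = {}
--     for word, next_word in zip(words, words[1:]):
--         groups.setdefault(word, []).append(next_word)
--     return {word: _count(ns) for word, ns in groups.items()}
-- ===== Notes on version B (the rewrite author's own statement) =====
-- stated objective: alternative
-- what changed: Instead of A's single index-driven loop (enumerate + words[i+1] + break) that grows the nested dict incrementally, B zips adjacent words into bigrams, groups successor words by first word in one pass, and then builds each inner count dict per group in a separate counting pass.
import Mathlib
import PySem

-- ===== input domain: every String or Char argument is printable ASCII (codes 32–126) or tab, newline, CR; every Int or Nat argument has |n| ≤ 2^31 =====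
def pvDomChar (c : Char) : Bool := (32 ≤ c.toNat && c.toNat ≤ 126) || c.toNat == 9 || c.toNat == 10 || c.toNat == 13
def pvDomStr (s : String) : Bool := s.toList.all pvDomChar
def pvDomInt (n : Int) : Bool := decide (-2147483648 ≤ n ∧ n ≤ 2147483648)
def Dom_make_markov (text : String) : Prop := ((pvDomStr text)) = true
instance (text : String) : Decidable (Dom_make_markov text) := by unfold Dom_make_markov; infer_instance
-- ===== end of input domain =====

-- B replaces A's index/break loop with a zip-bigrams → group-by-first-word → per-group count pipeline (alternative decomposition, same cost).


-- ===== PORT A =====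
-- the 'for i, word in enumerate(words): if i == len(words)-1: break …' loop, as recursion
-- carrying the index i and the remaining suffix of words; 'words' is kept whole for words[i+1].
def markovLoopA (words : List String) :
    Nat → List String → PySem.Dict String (PySem.Dict String Int) →
    PySem.Dict String (PySem.Dict String Int)
  | _, [], output => output
  | i, word :: rest, output =>
    if i = words.length - 1 then output
    else
      match PySem.List.pyGet? words ((i : Int) + 1) with
      | none => output  -- unreachable: the break fires before the last index
      | some next_word =>
        let output := if output.contains word then output
                      else output.insert word PySem.Dict.empty
        let inner := output.getD word PySem.Dict.empty
        let inner := if inner.contains next_word then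
                       inner.insert next_word (inner.getD next_word 0 + 1)
                     else inner.insert next_word 1
        markovLoopA words (i + 1) rest (output.insert word inner)

def make_markov (text : String) : List (String × List (String × Int)) :=
  let words := PySem.Str.split₀ text
  (markovLoopA words 0 words PySem.Dict.empty).items.map (fun p => (p.1, p.2.items))

-- ===== PORT B =====
-- _count(ns): c[n] = c.get(n, 0) + 1
def countB (ns : List String) : PySem.Dict String Int :=
  ns.foldl (fun c n => c.insert n (c.getD n 0 + 1)) PySem.Dict.empty

def make_markov_alt (text : String) : List (String × List (String × Int)) :=
  let words := PySem.Str.split₀ text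
  let groups := (words.zip (PySem.List.slice words (some 1) none)).foldl
      (fun (g : PySem.Dict String (List String)) p => g.modify p.1 [] (· ++ [p.2]))
      PySem.Dict.empty
  groups.items.map (fun p => (p.1, (countB p.2).items))

-- ===== PRECONDITION & SPEC =====
def Spec_make_markov (text : String) (out : List (String × List (String × Int))) : Prop := out = make_markov_alt text
instance (text : String) (out : List (String × List (String × Int))) : Decidable (Spec_make_markov text out) := by unfold Spec_make_markov; infer_instance

-- ===== CLAIM (what is proved, stated in full; the proofs are below) =====
def Claim_equal_make_markov : Prop := ∀ (text : String), Dom_make_markov text → Spec_make_markov text (make_markov text)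

-- ===== LEMMAS AND PROOFS =====

-- A's loop body, as a function of the bigram (word, next_word)
def stepA (d : PySem.Dict String (PySem.Dict String Int)) (p : String × String) :
    PySem.Dict String (PySem.Dict String Int) :=
  let d := if d.contains p.1 then d else d.insert p.1 PySem.Dict.empty
  let inner := d.getD p.1 PySem.Dict.empty
  let inner := if inner.contains p.2 then inner.insert p.2 (inner.getD p.2 0 + 1)
               else inner.insert p.2 1
  d.insert p.1 inner

-- A's enumerate/break/index loop is a fold of stepA over the bigrams of the suffix
theorem markovLoopA_eq_foldl (suf pre : List String)
    (d : PySem.Dict String (PySem.Dict String Int)) :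
    markovLoopA (pre ++ suf) pre.length suf d =
      (suf.zip suf.tail).foldl stepA d := by
  induction suf generalizing pre d with
  | nil => simp [markovLoopA]
  | cons w rest ih =>
    cases rest with
    | nil =>
      simp [markovLoopA]
    | cons n rest' =>
      have hlen : pre.length ≠ (pre ++ w :: n :: rest').length - 1 := by
        simp
      have hget : PySem.List.pyGet? (pre ++ w :: n :: rest') ((pre.length : Int) + 1) =
          some n := by
        have : ((pre.length : Int) + 1) = (((pre.length + 1 : Nat)) : Int) := by push_cast; ring
        rw [this, PySem.List.pyGet?_natCast]
        simp
      rw [markovLoopA, if_neg hlen, hget]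
      have := ih (pre := pre ++ [w]) (d := stepA d (w, n))
      simpa [stepA, List.append_assoc] using this

-- stepA is a nested counter update (modify at the first word, modify at the second inside)
theorem stepA_eq_modify (d : PySem.Dict String (PySem.Dict String Int)) (p : String × String) :
    stepA d p = d.modify p.1 PySem.Dict.empty (fun inner => inner.modify p.2 0 (· + 1)) := by
  unfold stepA PySem.Dict.modify
  by_cases h : d.contains p.1
  · simp only [h, if_true]
    by_cases h2 : (d.getD p.1 PySem.Dict.empty).contains p.2
    · simp [h2]
    · rw [if_neg h2, PySem.Dict.getD_of_not_contains _ 0 (by simpa using h2)]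
      norm_num
  · rw [if_neg h]
    rw [PySem.Dict.getD_of_not_contains _ PySem.Dict.empty (by simpa using h)]
    simp only [PySem.Dict.getD_insert_self, PySem.Dict.insert_insert_self,
      PySem.Dict.contains_empty, PySem.Dict.getD_empty, Bool.false_eq_true, if_false]
    norm_num

-- getD through a fold of modifies keyed by p.1 sees exactly the entries with that key
theorem getD_foldl_modify_fst {ν : Type} (l : List (String × String))
    (d : PySem.Dict String ν) (d0 : ν) (g : String × String → ν → ν) (w : String) :
    (l.foldl (fun d p => d.modify p.1 d0 (g p)) d).getD w d0 =
      (l.filter (fun p => p.1 == w)).foldl (fun x p => g p x) (d.getD w d0) := by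
  induction l generalizing d with
  | nil => rfl
  | cons p l ih =>
    by_cases h : p.1 = w
    · simp [List.foldl_cons, ih, h]
    · simp [List.foldl_cons, ih, h, PySem.Dict.getD_modify_of_ne, Ne.symm h]

-- ===== VERDICT (by name: the statement is the Claim_ definition above) =====
theorem make_markov_spec : Claim_equal_make_markov := by
  intro text _
  unfold Spec_make_markov
  simp only [make_markov, make_markov_alt, PySem.List.slice_from_one]
  have hloop := markovLoopA_eq_foldl (PySem.Str.split₀ text) [] PySem.Dict.empty
  simp only [List.nil_append, List.length_nil] at hloop
  rw [hloop]
  have hstep : stepA = fun d p =>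
      d.modify p.1 PySem.Dict.empty (fun inner => inner.modify p.2 0 (· + 1)) :=
    funext fun d => funext fun p => stepA_eq_modify d p
  rw [hstep]
  generalize (PySem.Str.split₀ text).zip (PySem.Str.split₀ text).tail = pairs
  have hndA := PySem.Dict.nodup_keys_foldl_modify_key pairs Prod.fst PySem.Dict.empty
    (fun _ p => (fun (inner : PySem.Dict String Int) => inner.modify p.2 0 (· + 1)))
    PySem.Dict.empty PySem.Dict.nodup_keys_empty
  have hndB := PySem.Dict.nodup_keys_foldl_modify_key pairs Prod.fst []
    (fun _ p => (· ++ [p.2])) PySem.Dict.empty PySem.Dict.nodup_keys_empty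
  beta_reduce at hndA hndB
  have hkA := PySem.Dict.keys_foldl_modify_key (l := pairs) (key := Prod.fst)
    (d0 := PySem.Dict.empty)
    (f := fun _ p => (fun (inner : PySem.Dict String Int) => inner.modify p.2 0 (· + 1)))
    (d := PySem.Dict.empty)
  have hkB := PySem.Dict.keys_foldl_modify_key (l := pairs) (key := Prod.fst)
    (d0 := ([] : List String)) (f := fun _ p => (· ++ [p.2])) (d := PySem.Dict.empty)
  rw [PySem.Dict.items_eq_map_keys _ hndA PySem.Dict.empty,
    PySem.Dict.items_eq_map_keys _ hndB ([] : List String)]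
  simp only [List.map_map]
  rw [hkA, hkB]
  apply List.map_congr_left
  intro w _
  have h1 : (pairs.foldl (fun d p =>
      d.modify p.1 PySem.Dict.empty (fun inner => inner.modify p.2 0 (· + 1)))
      PySem.Dict.empty).getD w PySem.Dict.empty =
      PySem.Dict.counter ((pairs.filter (fun p => p.1 == w)).map Prod.snd) := by
    rw [getD_foldl_modify_fst, PySem.Dict.counter_eq_foldl, List.foldl_map,
      PySem.Dict.getD_empty]
  have h2 : (pairs.foldl (fun (g : PySem.Dict String (List String)) p =>
      g.modify p.1 [] (· ++ [p.2])) PySem.Dict.empty).getD w [] =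
      (pairs.filter (fun p => p.1 == w)).map Prod.snd := by
    rw [PySem.Dict.getD_foldl_modify_append, PySem.Dict.getD_empty, List.nil_append]
  have h3 : countB ((pairs.filter (fun p => p.1 == w)).map Prod.snd) =
      PySem.Dict.counter ((pairs.filter (fun p => p.1 == w)).map Prod.snd) :=
    PySem.Dict.foldl_insert_getD_add_one_eq_counter _
  simp only [Function.comp_apply]
  rw [h1, h2, h3]
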